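-- pv_equiv track=rewrite | github.com/Textualize/rich | rich/filesize.py | pick_unit_and_suffix
-- ===== SOURCE A (Python) =====
-- from typing import Iterable, List, Tuple
--
-- def pick_unit_and_suffix(size: int, suffixes: List[str], base: int) -> Tuple[int, str]:
--     """Pick a suffix and base for the given size."""
--     unit = 1
--     suffix = "bytes"
--     if size < base:
--         return 1, suffix
--     for i, suffix in enumerate(suffixes, 2):
--         unit = base ** i
--         if size < unit:
--             break
--     return unit, suffix
-- ===== SOURCE B (Python) =====
-- from typing import List, Tuple
--
-- def pick_unit_and_suffix(size: int, suffixes: List[str], base: int) -> Tuple[int, str]: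
--     """Pick a suffix and base for the given size (binary search on the power exponent)."""
--     if size < base or not suffixes:
--         return 1, "bytes"
--     n = len(suffixes)
--     lo, hi = 0, n
--     while lo < hi:
--         mid = (lo + hi) // 2
--         if size < base ** (mid + 2):
--             hi = mid
--         else:
--             lo = mid + 1
--     j = lo if lo < n else n - 1
--     return base ** (j + 2), suffixes[j]
-- ===== Notes on version B (the rewrite author's own statement) =====
-- stated objective: alternative
-- what changed: Replaces A's incremental enumerate-and-break scan with a bisect_right-style binary search over the exponent range, computing base**(mid+2) only at the O(log n) probe points and clamping to the last bucket when the search runs off the end.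
-- outside the precondition, e.g. on pick_unit_and_suffix(0, ['a', 'b'], -2): A returns (4, 'a'), B returns (-8, 'b')
import Mathlib
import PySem

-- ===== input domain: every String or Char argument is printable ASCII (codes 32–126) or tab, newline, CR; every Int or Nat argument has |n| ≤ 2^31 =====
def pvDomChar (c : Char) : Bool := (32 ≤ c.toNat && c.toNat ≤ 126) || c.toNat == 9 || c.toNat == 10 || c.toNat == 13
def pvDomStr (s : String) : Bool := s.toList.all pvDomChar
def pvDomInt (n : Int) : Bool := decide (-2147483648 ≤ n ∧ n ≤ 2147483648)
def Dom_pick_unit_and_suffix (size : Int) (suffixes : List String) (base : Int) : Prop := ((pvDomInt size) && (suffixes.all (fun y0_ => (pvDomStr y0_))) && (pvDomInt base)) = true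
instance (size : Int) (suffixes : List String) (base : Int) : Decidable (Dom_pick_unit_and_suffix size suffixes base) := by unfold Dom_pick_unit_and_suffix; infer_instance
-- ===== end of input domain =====

-- B replaces A's linear enumerate-and-break scan by a bisect_right-style binary
-- search over the exponent range (alternative algorithm; probes O(log n) powers).


-- ===== PORT A =====
-- the 'for i, suffix in enumerate(suffixes, 2)' loop with break, carrying (unit, suffix)
def pickGoA (size base : Int) : List String → Nat → Int × String → Int × String
  | [], _, acc => acc
  | s :: rest, i, _ =>
      let unit := base ^ i
      if size < unit then (unit, s)
      else pickGoA size base rest (i + 1) (unit, s)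

def pick_unit_and_suffix (size : Int) (suffixes : List String) (base : Int) : Int × String :=
  if size < base then (1, "bytes")
  else pickGoA size base suffixes 2 (1, "bytes")

-- ===== PORT B =====
-- the 'while lo < hi' binary search of Source B (bisect_right semantics on exponents)
def bsearchB (size base : Int) (lo hi : Nat) : Nat :=
  if lo < hi then
    if size < base ^ ((lo + hi) / 2 + 2) then bsearchB size base lo ((lo + hi) / 2)
    else bsearchB size base ((lo + hi) / 2 + 1) hi
  else lo
termination_by hi - lo
decreasing_by all_goals omega

-- the body after the early return: search the exponent range, clamp, index
def pickCoreB (size : Int) (suffixes : List String) (base : Int) : Int × String :=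
  let n := suffixes.length
  let lo := bsearchB size base 0 n
  let j := if lo < n then lo else n - 1
  (base ^ (j + 2), suffixes.getD j "")

def pick_unit_and_suffix_alt (size : Int) (suffixes : List String) (base : Int) : Int × String :=
  if size < base ∨ suffixes = [] then (1, "bytes")
  else pickCoreB size suffixes base

-- ===== PRECONDITION & SPEC =====
-- Pre_ excludes negative bases on inputs that reach the scan: a negative filesize
-- base is outside the natural domain of the function (rich calls it with 1000/1024),
-- and there the power sequence is non-monotone, so B's binary search picks a
-- different (equally arbitrary) bucket than A's scan.
def Pre_pick_unit_and_suffix (size : Int) (suffixes : List String) (base : Int) : Prop :=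
  0 ≤ base ∨ size < base ∨ suffixes = []
instance (size : Int) (suffixes : List String) (base : Int) : Decidable (Pre_pick_unit_and_suffix size suffixes base) := by unfold Pre_pick_unit_and_suffix; infer_instance

def pvWitness_pick_unit_and_suffix : Int × List String × Int := (2000000, ["KB", "MB", "GB"], 1000)

def Spec_pick_unit_and_suffix (size : Int) (suffixes : List String) (base : Int) (out : Int × String) : Prop := out = pick_unit_and_suffix_alt size suffixes base
instance (size : Int) (suffixes : List String) (base : Int) (out : Int × String) : Decidable (Spec_pick_unit_and_suffix size suffixes base out) := by unfold Spec_pick_unit_and_suffix; infer_instance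

-- ===== CLAIM =====
def Claim_equal_pick_unit_and_suffix : Prop := ∀ (size : Int) (suffixes : List String) (base : Int), Dom_pick_unit_and_suffix size suffixes base → Pre_pick_unit_and_suffix size suffixes base → Spec_pick_unit_and_suffix size suffixes base (pick_unit_and_suffix size suffixes base)

-- ===== LEMMAS AND PROOFS =====

-- zeta-reduced form of pickCoreB, for rewriting
lemma pickCoreB_eq (size : Int) (sfx : List String) (base : Int) :
    pickCoreB size sfx base =
      (base ^ ((if bsearchB size base 0 sfx.length < sfx.length
                then bsearchB size base 0 sfx.length else sfx.length - 1) + 2),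
       sfx.getD (if bsearchB size base 0 sfx.length < sfx.length
                 then bsearchB size base 0 sfx.length else sfx.length - 1) "") := rfl

-- power monotonicity for nonnegative base and exponents ≥ 1
lemma pow_mono_base_nonneg (base : Int) (hb : 0 ≤ base) {m n : Nat}
    (hm : 1 ≤ m) (h : m ≤ n) : base ^ m ≤ base ^ n := by
  rcases hb.lt_or_eq with h1 | h0
  · exact pow_le_pow_right₀ (by omega) h
  · subst h0
    rw [zero_pow (by omega : m ≠ 0), zero_pow (by omega : n ≠ 0)]

-- characterisation of A's scan: if r is the least index whose power exceeds size
-- (r = length if none), the scan returns bucket min r (length - 1)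
lemma goA_char (size base : Int) :
    ∀ (l : List String) (i : Nat) (r : Nat) (acc : Int × String), l ≠ [] → r ≤ l.length →
    (∀ a, a < r → ¬ size < base ^ (i + a)) →
    (∀ b, r ≤ b → b < l.length → size < base ^ (i + b)) →
    pickGoA size base l i acc =
      (base ^ (i + min r (l.length - 1)), l.getD (min r (l.length - 1)) "") := by
  intro l
  induction l with
  | nil => intro _ _ _ h; exact absurd rfl h
  | cons s rest ih =>
    intro i r acc _ hr h1 h2
    cases rest with
    | nil =>
      have hm : min r (([s] : List String).length - 1) = 0 := by simp
      rw [hm]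
      by_cases hlt : size < base ^ i
      · simp [pickGoA, hlt]
      · simp [pickGoA, hlt]
    | cons t rest' =>
      by_cases hlt : size < base ^ i
      · have hr0 : r = 0 := by
          by_contra hne
          exact absurd (by simpa using hlt) (h1 0 (by omega))
        subst hr0
        simp [pickGoA, hlt]
      · have hr1 : 1 ≤ r := by
          by_contra hne
          exact hlt (by simpa using h2 0 (by omega) (by simp))
        have step : pickGoA size base (s :: t :: rest') i acc
            = pickGoA size base (t :: rest') (i + 1) (base ^ i, s) := by
          simp [pickGoA, hlt]
        rw [step, ih (i + 1) (r - 1) (base ^ i, s) (by simp) (by simp at hr ⊢; omega)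
          (fun a ha => by
            have := h1 (a + 1) (by omega)
            simpa [Nat.add_assoc, Nat.add_comm 1 a] using this)
          (fun b hb hb' => by
            have := h2 (b + 1) (by omega) (by simp at hb' ⊢; omega)
            simpa [Nat.add_assoc, Nat.add_comm 1 b] using this)]
        have hmin : min r ((s :: t :: rest').length - 1)
            = min (r - 1) ((t :: rest').length - 1) + 1 := by
          simp at hr ⊢; omega
        rw [hmin]
        have hexp : i + 1 + min (r - 1) ((t :: rest').length - 1)
            = i + (min (r - 1) ((t :: rest').length - 1) + 1) := by omega
        rw [hexp, List.getD_cons_succ]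

-- invariant of the binary search (fuel d bounds hi - lo): for a nonnegative base the
-- power sequence is monotone, so the result separates ≤-size from >-size exponents
lemma bsearch_inv_aux (size base : Int) (hb : 0 ≤ base) (n : Nat) :
    ∀ d lo hi, hi - lo ≤ d → lo ≤ hi → hi ≤ n →
    (∀ a, a < lo → ¬ size < base ^ (a + 2)) →
    (∀ b, hi ≤ b → b < n → size < base ^ (b + 2)) →
    bsearchB size base lo hi ≤ n ∧
    (∀ a, a < bsearchB size base lo hi → ¬ size < base ^ (a + 2)) ∧
    (∀ b, bsearchB size base lo hi ≤ b → b < n → size < base ^ (b + 2)) := by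
  intro d
  induction d with
  | zero =>
    intro lo hi hd hlh hhl h1 h2
    have hcmp : ¬ lo < hi := by omega
    rw [bsearchB, if_neg hcmp]
    exact ⟨by omega, h1, fun b hb1 hb2 => h2 b (by omega) hb2⟩
  | succ d ih =>
    intro lo hi hd hlh hhl h1 h2
    by_cases hcmp : lo < hi
    · by_cases hP : size < base ^ ((lo + hi) / 2 + 2)
      · have hrec : bsearchB size base lo hi = bsearchB size base lo ((lo + hi) / 2) := by
          rw [bsearchB, if_pos hcmp, if_pos hP]
        rw [hrec]
        exact ih lo ((lo + hi) / 2) (by omega) (by omega) (by omega) h1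
          (fun b hb1 hb2 =>
            lt_of_lt_of_le hP (pow_mono_base_nonneg base hb (by omega) (by omega)))
      · have hrec : bsearchB size base lo hi = bsearchB size base ((lo + hi) / 2 + 1) hi := by
          rw [bsearchB, if_pos hcmp, if_neg hP]
        rw [hrec]
        exact ih ((lo + hi) / 2 + 1) hi (by omega) (by omega) hhl
          (fun a ha hc =>
            hP (lt_of_lt_of_le hc (pow_mono_base_nonneg base hb (by omega) (by omega))))
          h2
    · rw [bsearchB, if_neg hcmp]
      exact ⟨by omega, h1, fun b hb1 hb2 => h2 b (by omega) hb2⟩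

-- ===== VERDICT =====
theorem pick_unit_and_suffix_spec : Claim_equal_pick_unit_and_suffix := by
  intro size suffixes base _ hpre
  unfold Spec_pick_unit_and_suffix pick_unit_and_suffix pick_unit_and_suffix_alt
  by_cases hsb : size < base
  · simp [hsb]
  · by_cases hs : suffixes = []
    · subst hs; simp [hsb, pickGoA]
    · rcases hpre with hb | hb | hb
      · have hBne : ¬ (size < base ∨ suffixes = []) := by
          rintro (h | h) <;> [exact hsb h; exact hs h]
        rw [if_neg hsb, if_neg hBne, pickCoreB_eq]
        have hn1 : 1 ≤ suffixes.length := by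
          cases suffixes with
          | nil => exact absurd rfl hs
          | cons a l => simp
        obtain ⟨hr1, hr2, hr3⟩ := bsearch_inv_aux size base hb suffixes.length
          suffixes.length 0 suffixes.length (by omega) (by omega) (le_refl _)
          (by omega) (by omega)
        set r := bsearchB size base 0 suffixes.length with hrdef
        have hj : (if r < suffixes.length then r else suffixes.length - 1)
            = min r (suffixes.length - 1) := by
          split_ifs <;> omega
        rw [hj]
        have hAchar := goA_char size base suffixes 2 r (1, "bytes") hs hr1
          (fun a ha => by
            have := hr2 a ha
            rwa [Nat.add_comm a 2] at this)
          (fun b hb1 hb2 => by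
            have := hr3 b hb1 hb2
            rwa [Nat.add_comm b 2] at this)
        rw [hAchar, Nat.add_comm 2 (min r (suffixes.length - 1))]
      · exact absurd hb hsb
      · exact absurd hb hs
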